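-- pv_equiv track=rewrite | github.com/pkthedragon/Fabled | generate_favorite_quest_reports.py | _safe_id
-- ===== SOURCE A (Python) =====
-- def _safe_id(name: str) -> str:
--     cleaned = []
--     for char in name.lower():
--         if char.isalnum():
--             cleaned.append(char)
--         else:
--             cleaned.append("_")
--     value = "".join(cleaned)
--     while "__" in value:
--         value = value.replace("__", "_")
--     return value.strip("_")
-- ===== SOURCE B (Python) =====
-- def _safe_id(name: str) -> str:
--     result = []
--     for ch in name.lower():
--         if ch.isalnum():
--             result.append(ch)
--         elif not result or result[-1] != "_":
--             result.append("_")
--     return "".join(result).strip("_")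
-- ===== Notes on version B (the rewrite author's own statement) =====
-- stated objective: simpler
-- what changed: One pass that collapses underscore runs inline via a last-appended check, removing the intermediate join and the iterative while/replace loop.
import Mathlib
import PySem

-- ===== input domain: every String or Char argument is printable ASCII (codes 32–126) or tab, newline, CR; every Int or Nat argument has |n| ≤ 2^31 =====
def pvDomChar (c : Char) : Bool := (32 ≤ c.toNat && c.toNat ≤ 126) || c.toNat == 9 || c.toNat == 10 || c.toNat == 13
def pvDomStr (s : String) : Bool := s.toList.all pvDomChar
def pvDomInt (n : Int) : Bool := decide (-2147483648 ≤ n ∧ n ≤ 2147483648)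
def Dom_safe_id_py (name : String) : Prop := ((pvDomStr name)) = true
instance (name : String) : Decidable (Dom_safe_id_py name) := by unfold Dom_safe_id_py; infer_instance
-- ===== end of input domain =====

-- B replaces A's join + iterative while/replace collapsing by a single pass with a
-- last-appended-character check (simpler); equality of return values is proved below.

-- ===== PORT A =====
-- the 'while "__" in value: value = value.replace("__", "_")' loop; each pass that
-- fires shortens the string, so fuel = len(value) always suffices (totality device only)
def safeIdLoopA : Nat → String → String
  | 0, v => v
  | f + 1, v =>
    if PySem.Str.isIn "__" v then safeIdLoopA f (PySem.Str.replace v "__" "_") else v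

def safe_id_py (name : String) : String :=
  let cleaned : List String :=
    (PySem.Str.lower name).toList.foldl
      (fun acc c => acc ++ [if PySem.Str.isalnum c then String.ofList [c] else "_"]) []
  let value := PySem.Str.join "" cleaned
  let value := safeIdLoopA value.toList.length value
  PySem.Str.stripChars value "_"

-- ===== PORT B =====
-- the single pass of Source B: append alnum chars, append '_' only when the last
-- appended char is not already '_' (result kept reversed in acc)
def safeIdGoB : List Char → List Char → List Char
  | [], acc => acc.reverse
  | c :: t, acc =>
    if PySem.Str.isalnum c then safeIdGoB t (c :: acc)
    else if acc.head? = some '_' then safeIdGoB t acc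
    else safeIdGoB t ('_' :: acc)

def safe_id_py_alt (name : String) : String :=
  PySem.Str.stripChars (String.ofList (safeIdGoB (PySem.Str.lower name).toList [])) "_"

-- ===== PRECONDITION & SPEC =====
def Spec_safe_id_py (name : String) (out : String) : Prop := out = safe_id_py_alt name
instance (name : String) (out : String) : Decidable (Spec_safe_id_py name out) := by unfold Spec_safe_id_py; infer_instance

-- ===== CLAIM (what is proved, stated in full; the proofs are below) =====
def Claim_equal_safe_id_py : Prop := ∀ (name : String), Dom_safe_id_py name → Spec_safe_id_py name (safe_id_py name)

-- ===== LEMMAS AND PROOFS =====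

-- list-level image of the character-mapping loop
def mapA (cs : List Char) : List Char := cs.map (fun c => if PySem.Chars.isalnum c then c else '_')

-- list-level image of the while loop
def collapseL : Nat → List Char → List Char
  | 0, v => v
  | f + 1, v =>
    if PySem.Chars.isIn ['_', '_'] v then collapseL f (PySem.Chars.replace v ['_', '_'] ['_']) else v

-- one left-to-right pass of value.replace("__", "_")
def replAll : List Char → List Char
  | [] => []
  | [c] => [c]
  | a :: b :: t => if a = '_' ∧ b = '_' then '_' :: replAll t else a :: replAll (b :: t)

-- reference collapse: squeeze runs of '_' given whether the previous kept char was '_'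
def sqz : Bool → List Char → List Char
  | _, [] => []
  | b, c :: t => if c = '_' then (if b then sqz true t else '_' :: sqz true t) else c :: sqz false t

-- does the list contain two adjacent underscores?
def hasPair : List Char → Bool
  | [] => false
  | [_] => false
  | a :: b :: t => (a = '_' && b = '_') || hasPair (b :: t)

lemma und_not_alnum : PySem.Chars.isalnum '_' = false := by decide

lemma go_eq : ∀ (fuel : Nat) (l acc : List Char), l.length ≤ fuel →
    PySem.Chars.replace.go ['_', '_'] ['_'] fuel l acc = acc.reverse ++ replAll l := by
  intro fuel
  induction fuel with
  | zero =>
    intro l acc h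
    have : l = [] := by simpa using h
    subst this; simp [PySem.Chars.replace.go, replAll]
  | succ f ih =>
    intro l acc h
    match l with
    | [] => simp [PySem.Chars.replace.go, replAll]
    | c :: t =>
      by_cases hp : List.isPrefixOf ['_', '_'] (c :: t)
      · obtain ⟨u, hu⟩ := List.isPrefixOf_iff_prefix.mp hp
        cases hu
        simp only [PySem.Chars.replace.go, List.append_eq, List.cons_append,
          List.nil_append, List.length_cons, List.length_nil, List.drop_succ_cons,
          List.drop_zero, List.reverse_cons, List.reverse_nil]
        rw [ih u ('_' :: acc) (by simp at h ⊢; omega)]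
        simp [replAll]
      · simp only [PySem.Chars.replace.go, hp]
        rw [ih t (c :: acc) (by simp at h ⊢; omega)]
        have hr : replAll (c :: t) = c :: replAll t := by
          match t with
          | [] => rfl
          | b :: t' =>
            have : ¬(c = '_' ∧ b = '_') := by
              intro ⟨h1, h2⟩; subst h1; subst h2
              exact hp (by simp [List.isPrefixOf])
            simp [replAll, this]
        rw [hr]; simp

lemma replace_eq_replAll (cs : List Char) :
    PySem.Chars.replace cs ['_', '_'] ['_'] = replAll cs := by
  have := go_eq cs.length cs [] le_rfl
  simpa [PySem.Chars.replace] using this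

lemma hasPair_iff (cs : List Char) : hasPair cs = true ↔ ['_', '_'] <:+: cs := by
  induction cs using hasPair.induct with
  | case1 => simp [hasPair]
  | case2 c =>
    simp only [hasPair, Bool.false_eq_true, false_iff]
    intro h
    have := h.length_le
    simp at this
  | case3 a b t ih =>
    rw [List.infix_cons_iff]
    constructor
    · intro h
      simp only [hasPair, Bool.or_eq_true, Bool.and_eq_true, decide_eq_true_eq] at h
      rcases h with ⟨h1, h2⟩ | h
      · subst h1; subst h2; exact Or.inl ⟨t, rfl⟩
      · exact Or.inr (ih.mp h)
    · intro h
      simp only [hasPair, Bool.or_eq_true, Bool.and_eq_true, decide_eq_true_eq]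
      rcases h with h | h
      · obtain ⟨u, hu⟩ := h
        cases hu
        exact Or.inl ⟨rfl, rfl⟩
      · exact Or.inr (ih.mpr h)

lemma replAll_len_le (cs : List Char) : (replAll cs).length ≤ cs.length := by
  induction cs using replAll.induct with
  | case1 => simp [replAll]
  | case2 c => simp [replAll]
  | case3 a b t hab ih => simp [replAll, hab]; omega
  | case4 a b t hab ih => simp [replAll, hab]; simpa using ih

lemma replAll_len_lt (cs : List Char) (h : hasPair cs = true) :
    (replAll cs).length < cs.length := by
  induction cs using replAll.induct with
  | case1 => simp [hasPair] at h
  | case2 c => simp [hasPair] at h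
  | case3 a b t hab ih =>
    have := replAll_len_le t
    simp [replAll, hab]; omega
  | case4 a b t hab ih =>
    have hp : hasPair (b :: t) = true := by
      simp only [hasPair, Bool.or_eq_true, Bool.and_eq_true, decide_eq_true_eq] at h
      rcases h with ⟨h1, h2⟩ | h
      · exact absurd ⟨h1, h2⟩ hab
      · exact h
    have h2 := ih hp
    rw [show replAll (a :: b :: t) = a :: replAll (b :: t) from by simp [replAll, hab]]
    simp only [List.length_cons] at h2 ⊢
    omega

lemma sqz_cons_ne (b : Bool) (c : Char) (t : List Char) (hc : ¬ c = '_') :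
    sqz b (c :: t) = c :: sqz false t := by simp [sqz, hc]

lemma sqz_replAll (cs : List Char) : ∀ b, sqz b (replAll cs) = sqz b cs := by
  induction cs using replAll.induct with
  | case1 => intro b; rfl
  | case2 c => intro b; rfl
  | case3 a b t hab ih =>
    obtain ⟨h1, h2⟩ := hab; subst h1; subst h2
    intro fb
    simp [replAll, sqz, ih]
  | case4 a b t hab ih =>
    intro fb
    by_cases ha : a = '_'
    · subst ha
      have hb : ¬ b = '_' := fun hh => hab ⟨rfl, hh⟩
      simp [replAll, hb, sqz, ih]
    · simp [replAll, hab, sqz_cons_ne _ _ _ ha, ih]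

lemma sqz_id_of_noPair (cs : List Char) (h : hasPair cs = false) :
    sqz false cs = cs ∧ (cs.head? ≠ some '_' → sqz true cs = cs) := by
  induction cs using hasPair.induct with
  | case1 => exact ⟨rfl, fun _ => rfl⟩
  | case2 c =>
    constructor
    · by_cases hc : c = '_' <;> simp [sqz, hc]
    · intro hh
      have hc : ¬ c = '_' := by simpa using hh
      simp [sqz, hc]
  | case3 a b t ih =>
    simp only [hasPair, Bool.or_eq_false_iff, Bool.and_eq_false_iff] at h
    obtain ⟨hab, hp⟩ := h
    obtain ⟨ih1, ih2⟩ := ih hp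
    by_cases ha : a = '_'
    · subst ha
      have hb : ¬ b = '_' := by
        rcases hab with h | h
        · simp at h
        · simpa using h
      have hbt : sqz true (b :: t) = b :: t := ih2 (by simpa using hb)
      refine ⟨?_, ?_⟩
      · show sqz false ('_' :: b :: t) = '_' :: b :: t
        rw [show sqz false ('_' :: b :: t) = '_' :: sqz true (b :: t) from by simp [sqz], hbt]
      · intro hh; simp at hh
    · refine ⟨?_, fun _ => ?_⟩ <;> simp [sqz_cons_ne _ _ _ ha, ih1]

lemma collapseL_eq : ∀ (fuel : Nat) (cs : List Char), cs.length ≤ fuel →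
    collapseL fuel cs = sqz false cs := by
  intro fuel
  induction fuel with
  | zero =>
    intro cs h
    have : cs = [] := by simpa using h
    subst this; rfl
  | succ f ih =>
    intro cs h
    by_cases hin : PySem.Chars.isIn ['_', '_'] cs
    · have hp : hasPair cs = true :=
        (hasPair_iff cs).mpr ((PySem.Chars.isIn_iff_infix _ _).mp hin)
      have hlt := replAll_len_lt cs hp
      simp only [collapseL, hin, if_true, replace_eq_replAll]
      rw [ih _ (by omega), sqz_replAll]
    · have hp : hasPair cs = false := by
        rw [← Bool.not_eq_true, hasPair_iff]
        intro hinf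
        exact hin ((PySem.Chars.isIn_iff_infix _ _).mpr hinf)
      simp only [collapseL, hin]
      exact ((sqz_id_of_noPair cs hp).1).symm

lemma loopA_toList (f : Nat) : ∀ v : String,
    (safeIdLoopA f v).toList = collapseL f v.toList := by
  induction f with
  | zero => intro v; rfl
  | succ f ih =>
    intro v
    have hb : PySem.Str.isIn "__" v = PySem.Chars.isIn ['_', '_'] v.toList := by
      simp [PySem.Str.isIn]
    have hrep : (PySem.Str.replace v "__" "_").toList
        = PySem.Chars.replace v.toList ['_', '_'] ['_'] := by
      simp [PySem.Str.replace]
    simp only [safeIdLoopA, collapseL, hb]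
    by_cases hin : PySem.Chars.isIn ['_', '_'] v.toList = true
    · simp [hin, ih, hrep]
    · simp [hin]

lemma goB_eq : ∀ (l acc : List Char),
    safeIdGoB l acc = acc.reverse ++ sqz (decide (acc.head? = some '_')) (mapA l) := by
  intro l
  induction l with
  | nil => intro acc; simp [safeIdGoB, mapA, sqz]
  | cons c t ih =>
    intro acc
    by_cases h : PySem.Str.isalnum c = true
    · have hc : ¬ c = '_' := by
        intro hc; subst hc
        exact absurd h (by simp [PySem.Str.isalnum, und_not_alnum])
      simp only [safeIdGoB, h, if_true, ih]
      simp [mapA, PySem.Str.isalnum] at h ⊢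
      simp [h, sqz_cons_ne _ _ _ hc, hc]
    · by_cases ha : acc.head? = some '_'
      · simp only [safeIdGoB, h, ha, if_true, ih]
        simp [mapA, PySem.Str.isalnum] at h ⊢
        simp [h, sqz]
      · simp only [safeIdGoB, h, if_false, ha, ih]
        simp [mapA, PySem.Str.isalnum] at h ⊢
        simp [h, sqz]

lemma value_toList (name : String) :
    (PySem.Str.join "" ((PySem.Str.lower name).toList.foldl
      (fun acc c => acc ++ [if PySem.Str.isalnum c then String.ofList [c] else "_"]) [])).toList
    = mapA (PySem.Str.lower name).toList := by
  rw [PySem.List.foldl_append_singleton_eq_map]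
  simp only [List.nil_append, PySem.Str.join, String.toList_ofList, List.map_map]
  have hmap : (String.toList ∘ fun c => if PySem.Str.isalnum c then String.ofList [c] else "_")
      = (fun x => [x]) ∘ (fun c => if PySem.Chars.isalnum c then c else '_') := by
    funext c
    by_cases h : PySem.Chars.isalnum c = true <;>
      simp [PySem.Str.isalnum, h, Function.comp]
  rw [hmap, ← List.map_map, ← mapA]
  simp [PySem.Chars.join_nil_singletons]

-- ===== VERDICT (by name: the statement is the Claim_ definition above) =====
theorem safe_id_py_spec : Claim_equal_safe_id_py := by
  intro name _
  unfold Spec_safe_id_py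
  unfold safe_id_py safe_id_py_alt
  simp only [PySem.Str.stripChars]
  rw [loopA_toList, value_toList, collapseL_eq _ _ le_rfl, String.toList_ofList, goB_eq]
  simp
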